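-- pv_equiv track=rewrite | github.com/miliar/Code_Jam_Webscraper | solutions_python/solutions_year16_round0_nr3/2347.py | convertFromBase
-- ===== SOURCE A (Python) =====
-- def convertFromBase(num, base):
-- 	result = 0
-- 	i = 0
-- 	while num > 0:
-- 		result = result + (num%2) * (base**i)
-- 		num = num // 2
-- 		i = i + 1
-- 	return result
-- ===== SOURCE B (Python) =====
-- def convertFromBase(num, base):
--     if num <= 0:
--         return 0
--     return convertFromBase(num // 2, base) * base + num % 2
-- ===== Notes on version B (the rewrite author's own statement) =====
-- stated objective: faster
-- what changed: B is a direct recursion implementing Horner's rule (value = value(num//2)*base + num%2), eliminating A's loop state (result, i) and the base**i power recomputed on every iteration.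
import Mathlib
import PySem

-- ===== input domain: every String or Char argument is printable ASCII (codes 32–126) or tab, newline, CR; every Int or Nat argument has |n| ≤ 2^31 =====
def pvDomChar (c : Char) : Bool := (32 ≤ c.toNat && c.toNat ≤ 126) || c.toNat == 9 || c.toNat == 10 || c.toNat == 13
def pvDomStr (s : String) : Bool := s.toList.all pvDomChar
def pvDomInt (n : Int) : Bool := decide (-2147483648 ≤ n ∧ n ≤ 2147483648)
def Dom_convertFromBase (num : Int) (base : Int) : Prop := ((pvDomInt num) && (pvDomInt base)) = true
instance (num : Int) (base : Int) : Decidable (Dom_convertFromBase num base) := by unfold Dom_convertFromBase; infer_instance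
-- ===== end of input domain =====

-- B replaces A's iterative loop with its per-iteration base**i power by a direct
-- Horner-rule recursion (objective: faster — O(n) vs O(n^2) digit operations).

-- ===== PORT A =====
-- A's while loop; state (num, result, i).  i starts at 0 and only increments, so it is
-- always ≥ 0 and Python's base**i is exactly base ^ i.toNat.
def convertFromBaseGo (num base result i : Int) : Int :=
  if h : 0 < num then
    convertFromBaseGo (PySem.Int.floordiv num 2) base
      (result + PySem.Int.mod num 2 * base ^ i.toNat) (i + 1)
  else result
termination_by num.toNat
decreasing_by
  rw [PySem.Int.floordiv_eq_ediv_of_pos (by omega : (0:Int) < 2)]; omega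

def convertFromBase (num : Int) (base : Int) : Int :=
  convertFromBaseGo num base 0 0

-- ===== PORT B =====
-- Source B: direct recursion, Horner's rule on the binary digits.
def convertFromBase_alt (num : Int) (base : Int) : Int :=
  if _h : num ≤ 0 then 0
  else convertFromBase_alt (PySem.Int.floordiv num 2) base * base + PySem.Int.mod num 2
termination_by num.toNat
decreasing_by
  rw [PySem.Int.floordiv_eq_ediv_of_pos (by omega : (0:Int) < 2)]; omega

-- ===== PRECONDITION & SPEC =====
def Spec_convertFromBase (num : Int) (base : Int) (out : Int) : Prop := out = convertFromBase_alt num base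
instance (num : Int) (base : Int) (out : Int) : Decidable (Spec_convertFromBase num base out) := by unfold Spec_convertFromBase; infer_instance

-- ===== CLAIM (what is proved, stated in full; the proofs are below) =====
def Claim_equal_convertFromBase : Prop := ∀ (num : Int) (base : Int), Dom_convertFromBase num base → Spec_convertFromBase num base (convertFromBase num base)

-- ===== LEMMAS AND PROOFS =====
theorem convertFromBaseGo_eq (n : Nat) : ∀ (num : Int), num.toNat = n →
    ∀ (base result i : Int), 0 ≤ i →
    convertFromBaseGo num base result i
      = result + convertFromBase_alt num base * base ^ i.toNat := by
  induction n using Nat.strong_induction_on with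
  | _ n ih =>
    intro num hn base result i hi
    rw [convertFromBaseGo, convertFromBase_alt]
    split_ifs with h h' h'
    · omega
    · have hd : PySem.Int.floordiv num 2 = num / 2 :=
        PySem.Int.floordiv_eq_ediv_of_pos (by omega)
      have hlt : (PySem.Int.floordiv num 2).toNat < n := by rw [hd]; omega
      rw [ih _ hlt _ rfl base _ (i + 1) (by omega)]
      have hsucc : (i + 1).toNat = i.toNat + 1 := by omega
      rw [hsucc, pow_succ]; ring
    · ring
    · omega

-- ===== VERDICT (by name: the statement is the Claim_ definition above) =====
theorem convertFromBase_spec : Claim_equal_convertFromBase := by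
  intro num base _
  unfold Spec_convertFromBase convertFromBase
  rw [convertFromBaseGo_eq num.toNat num rfl base 0 0 le_rfl]
  simp
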